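-- pv_equiv track=rewrite | github.com/Albert-learner/Algorithm | BaekJoon_Algorithm/1635.py | find_zero_sum_combinations
-- ===== SOURCE A (Python) =====
-- def generate_combinations(length):
--     if length == 0:
--         return [[]]
--     else:
--         previous_combinations = generate_combinations(length - 1)
--         new_combinations = []
--         for combination in previous_combinations:
--             new_combinations.append(combination + [-1])
--             new_combinations.append(combination + [1])
--         return new_combinations
--
-- def find_zero_sum_combinations(sequences):
--     zero_sum_combinations = []
--     for sequence in sequences:
--         combinations = generate_combinations(len(sequence))
--         for combination in combinations:
--             if sum(a*b for a, b in zip(sequence, combination)) == 0: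
--                 zero_sum_combinations.append(combination)
--                 break
--     return zero_sum_combinations
-- ===== SOURCE B (Python) =====
-- def find_zero_sum_combinations(sequences):
--     result = []
--     for seq in sequences:
--         # reach[i] = set of achievable signed sums of seq[i:]; built right to left
--         n = len(seq)
--         reach = [None] * (n + 1)
--         reach[n] = {0}
--         for i in range(n - 1, -1, -1):
--             nxt = reach[i + 1]
--             reach[i] = {s - seq[i] for s in nxt} | {s + seq[i] for s in nxt}
--         if 0 not in reach[0]:
--             continue
--         combo = []
--         p = 0
--         for i, v in enumerate(seq):
--             # prefer -1 (lexicographically first); feasible iff -(p - v) is reachable from the rest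
--             if v - p in reach[i + 1]:
--                 combo.append(-1)
--                 p -= v
--             else:
--                 combo.append(1)
--                 p += v
--         result.append(combo)
--     return result
-- ===== Notes on version B (the rewrite author's own statement) =====
-- stated objective: faster
-- what changed: Replaces A's recursive enumeration of all 2^n sign vectors with a right-to-left subset-sum reachability DP over sets plus a greedy left-to-right sign choice preferring -1, which yields the lexicographically first zero-sum assignment directly.
import Mathlib
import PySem

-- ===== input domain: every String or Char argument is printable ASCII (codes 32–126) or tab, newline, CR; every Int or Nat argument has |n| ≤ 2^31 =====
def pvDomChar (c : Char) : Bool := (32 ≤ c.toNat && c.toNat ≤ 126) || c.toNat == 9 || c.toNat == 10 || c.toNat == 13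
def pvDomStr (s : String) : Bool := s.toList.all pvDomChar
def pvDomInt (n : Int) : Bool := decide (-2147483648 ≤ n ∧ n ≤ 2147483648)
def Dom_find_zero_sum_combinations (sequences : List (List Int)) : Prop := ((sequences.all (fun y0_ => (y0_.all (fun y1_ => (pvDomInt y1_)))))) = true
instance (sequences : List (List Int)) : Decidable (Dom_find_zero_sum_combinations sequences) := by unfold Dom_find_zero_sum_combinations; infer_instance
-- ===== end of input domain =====

-- B replaces A's O(n·2^n) enumeration of all ±1 vectors by a right-to-left subset-sum
-- reachability DP plus a greedy left-to-right sign choice (-1 preferred), pseudo-polynomial per sequence.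

-- ===== PORT A =====
-- generate_combinations(length): recursive enumeration, -1 appended before 1
def generate_combinations : Nat → List (List Int)
  | 0 => [[]]
  | n + 1 =>
      (generate_combinations n).foldl
        (fun new_combinations combination =>
          new_combinations ++ [combination ++ [-1], combination ++ [1]]) []

-- sum(a*b for a, b in zip(sequence, combination))
def pvDotA (sequence combination : List Int) : Int :=
  ((sequence.zip combination).map (fun ab => ab.1 * ab.2)).sum

-- the inner 'for combination in combinations: … break' loop of A
def pvFirstZero (sequence : List Int) : List (List Int) → Option (List Int)
  | [] => none
  | c :: rest => if pvDotA sequence c = 0 then some c else pvFirstZero sequence rest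

def find_zero_sum_combinations (sequences : List (List Int)) : List (List Int) :=
  sequences.foldl
    (fun zero_sum_combinations sequence =>
      match pvFirstZero sequence (generate_combinations sequence.length) with
      | some c => zero_sum_combinations ++ [c]
      | none => zero_sum_combinations) []

-- ===== PORT B =====
-- reach list for seq: head = set of sums achievable from seq itself, built right to left
def pvReachList : List Int → List (PySem.Set Int)
  | [] => [PySem.Set.ofList [0]]
  | v :: t =>
      let rs := pvReachList t
      let nxt := rs.headD PySem.Set.empty
      PySem.Set.union (PySem.Set.ofList (nxt.map (fun s => s - v)))
        (PySem.Set.ofList (nxt.map (fun s => s + v))) :: rs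

-- greedy sign choice: rl carries the reach sets of the suffixes after each remaining element
def pvGreedy : Int → List Int → List (PySem.Set Int) → List Int
  | _, [], _ => []
  | p, v :: vs, rl =>
      let rnext := rl.headD PySem.Set.empty
      if PySem.Set.contains rnext (v - p) then
        (-1) :: pvGreedy (p - v) vs rl.tail
      else
        1 :: pvGreedy (p + v) vs rl.tail

def find_zero_sum_combinations_alt (sequences : List (List Int)) : List (List Int) :=
  sequences.foldl
    (fun result seq =>
      let rl := pvReachList seq
      if PySem.Set.contains (rl.headD PySem.Set.empty) 0 then
        result ++ [pvGreedy 0 seq rl.tail]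
      else result) []

-- ===== PRECONDITION & SPEC =====
def Spec_find_zero_sum_combinations (sequences : List (List Int)) (out : List (List Int)) : Prop := out = find_zero_sum_combinations_alt sequences
instance (sequences : List (List Int)) (out : List (List Int)) : Decidable (Spec_find_zero_sum_combinations sequences out) := by unfold Spec_find_zero_sum_combinations; infer_instance

-- ===== CLAIM (what is proved, stated in full; the proofs are below) =====
def Claim_equal_find_zero_sum_combinations : Prop := ∀ (sequences : List (List Int)), Dom_find_zero_sum_combinations sequences → Spec_find_zero_sum_combinations sequences (find_zero_sum_combinations sequences)

-- ===== LEMMAS AND PROOFS =====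

-- spec-side: first (lex order, -1 < 1) sign vector c for vs with dot vs c = t
def pvG (t : Int) : List Int → Option (List Int)
  | [] => if t = 0 then some [] else none
  | v :: vs => ((pvG (t + v) vs).map (List.cons (-1))).or ((pvG (t - v) vs).map (List.cons 1))

def pvReach (vs : List Int) : PySem.Set Int := (pvReachList vs).headD PySem.Set.empty

lemma gen_succ (n : Nat) :
    generate_combinations (n + 1)
      = (generate_combinations n).flatMap (fun c => [c ++ [-1], c ++ [1]]) := by
  show (generate_combinations n).foldl
      (fun acc c => acc ++ [c ++ [-1], c ++ [1]]) [] = _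
  rw [PySem.List.foldl_append_eq_flatMap (fun c => [c ++ [-1], c ++ [1]])
      (generate_combinations n) []]
  rfl

lemma gen_cons (n : Nat) :
    generate_combinations (n + 1)
      = (generate_combinations n).map (List.cons (-1))
        ++ (generate_combinations n).map (List.cons 1) := by
  induction n with
  | zero => rfl
  | succ n ih =>
    have hx : ∀ x : Int,
        List.flatMap (fun c => [c ++ [-1], c ++ [1]]) ((generate_combinations n).map (List.cons x))
          = List.map (List.cons x) (generate_combinations (n + 1)) := by
      intro x
      rw [List.flatMap_map, gen_succ n, List.map_flatMap]
      rfl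
    rw [gen_succ (n + 1)]
    conv_lhs => rw [ih]
    rw [List.flatMap_append, hx (-1), hx 1]

lemma firstZero_eq_find? (seq : List Int) (l : List (List Int)) :
    pvFirstZero seq l = l.find? (fun c => pvDotA seq c == 0) := by
  induction l with
  | nil => rfl
  | cons c rest ih =>
    by_cases h : pvDotA seq c = 0 <;> simp [pvFirstZero, h, ih]

lemma dot_cons (v x : Int) (vs cs : List Int) :
    pvDotA (v :: vs) (x :: cs) = v * x + pvDotA vs cs := by
  simp [pvDotA]

lemma find?_gen (vs : List Int) : ∀ t : Int,
    (generate_combinations vs.length).find? (fun c => pvDotA vs c == t) = pvG t vs := by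
  induction vs with
  | nil =>
    intro t
    by_cases h : t = 0
    · subst h; decide
    · have hp : (pvDotA ([] : List Int) [] == t) = false := by
        simp [pvDotA]
        omega
      show List.find? (fun c => pvDotA [] c == t) [[]] = pvG t []
      simp [hp, pvG, h]
  | cons v vs ih =>
    intro t
    have hl : (v :: vs).length = vs.length + 1 := rfl
    rw [hl, gen_cons, List.find?_append, List.find?_map, List.find?_map]
    have e1 : ((fun c => pvDotA (v :: vs) c == t) ∘ List.cons (-1))
        = fun c => pvDotA vs c == t + v := by
      funext c
      show (pvDotA (v :: vs) ((-1) :: c) == t) = _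
      rw [dot_cons, beq_eq_beq]
      omega
    have e2 : ((fun c => pvDotA (v :: vs) c == t) ∘ List.cons 1)
        = fun c => pvDotA vs c == t - v := by
      funext c
      show (pvDotA (v :: vs) (1 :: c) == t) = _
      rw [dot_cons, beq_eq_beq]
      omega
    rw [e1, e2, ih, ih]
    rfl

lemma mem_reach (vs : List Int) : ∀ s : Int, s ∈ pvReach vs ↔ (pvG s vs).isSome = true := by
  induction vs with
  | nil =>
    intro s
    by_cases h : s = 0 <;>
      simp [pvReach, pvReachList, PySem.Set.mem_ofList, pvG, h]
  | cons v vs ih =>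
    intro s
    have h1 : pvReach (v :: vs)
        = PySem.Set.union (PySem.Set.ofList ((pvReach vs).map (fun x => x - v)))
            (PySem.Set.ofList ((pvReach vs).map (fun x => x + v))) := rfl
    rw [h1, PySem.Set.mem_union, PySem.Set.mem_ofList, PySem.Set.mem_ofList]
    simp only [List.mem_map, pvG, Option.isSome_or, Option.isSome_map, Bool.or_eq_true]
    constructor
    · rintro (⟨x, hx, rfl⟩ | ⟨x, hx, rfl⟩)
      · exact Or.inl (by rw [show x - v + v = x by ring]; exact (ih x).mp hx)
      · exact Or.inr (by rw [show x + v - v = x by ring]; exact (ih x).mp hx)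
    · rintro (h | h)
      · exact Or.inl ⟨s + v, (ih _).mpr h, by ring⟩
      · exact Or.inr ⟨s - v, (ih _).mpr h, by ring⟩

lemma contains_reach (vs : List Int) (s : Int) :
    PySem.Set.contains (pvReach vs) s = (pvG s vs).isSome := by
  rw [Bool.eq_iff_iff]
  constructor
  · intro h
    exact (mem_reach vs s).mp (by simpa [PySem.Set.contains] using h)
  · intro h
    simpa [PySem.Set.contains] using (mem_reach vs s).mpr h

lemma greedy_first (vs : List Int) : ∀ p : Int,
    (pvG (-p) vs).isSome → pvG (-p) vs = some (pvGreedy p vs (pvReachList vs).tail) := by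
  induction vs with
  | nil =>
    intro p h
    by_cases hp : -p = 0
    · simp [pvG, hp, pvGreedy]
    · simp [pvG, hp] at h
  | cons v vs ih =>
    intro p h
    have htail : (pvReachList (v :: vs)).tail = pvReachList vs := rfl
    rw [htail]
    have hG : pvG (-p) (v :: vs)
        = ((pvG (v - p) vs).map (List.cons (-1))).or ((pvG (-(p + v)) vs).map (List.cons 1)) := by
      show ((pvG (-p + v) vs).map _).or ((pvG (-p - v) vs).map _) = _
      rw [show -p + v = v - p by ring, show -p - v = -(p + v) by ring]
    have hg : pvGreedy p (v :: vs) (pvReachList vs)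
        = if PySem.Set.contains ((pvReachList vs).headD PySem.Set.empty) (v - p) then
            (-1) :: pvGreedy (p - v) vs (pvReachList vs).tail
          else 1 :: pvGreedy (p + v) vs (pvReachList vs).tail := rfl
    have hhead : (pvReachList vs).headD PySem.Set.empty = pvReach vs := rfl
    rw [hG] at h ⊢
    rw [hg, hhead]
    cases hcond : PySem.Set.contains (pvReach vs) (v - p) with
    | true =>
      have h1 : (pvG (v - p) vs).isSome = true := by
        rw [← contains_reach]; exact hcond
      have h2 : pvG (v - p) vs = some (pvGreedy (p - v) vs (pvReachList vs).tail) := by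
        have := ih (p - v) (by rw [show -(p - v) = v - p by ring]; exact h1)
        rwa [show -(p - v) = v - p by ring] at this
      rw [Option.or_of_isSome (by simpa using h1), h2]
      rfl
    | false =>
      have h1 : pvG (v - p) vs = none := by
        have hc := contains_reach vs (v - p)
        rw [hcond] at hc
        exact Option.not_isSome_iff_eq_none.mp (by simp [← hc])
      rw [h1] at h ⊢
      simp only [Option.map_none, Option.none_or] at h ⊢
      have h2 : pvG (-(p + v)) vs = some (pvGreedy (p + v) vs (pvReachList vs).tail) :=
        ih (p + v) (by simpa using h)
      rw [h2]
      rfl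

lemma solve_eq (seq : List Int) :
    pvFirstZero seq (generate_combinations seq.length)
      = (if PySem.Set.contains (pvReach seq) 0 then
           some (pvGreedy 0 seq (pvReachList seq).tail) else none) := by
  rw [firstZero_eq_find?, find?_gen seq 0]
  cases hcond : PySem.Set.contains (pvReach seq) 0 with
  | true =>
    rw [if_pos rfl]
    have h1 : (pvG 0 seq).isSome = true := by rw [← contains_reach]; exact hcond
    have := greedy_first seq 0 (by simpa using h1)
    simpa using this
  | false =>
    rw [if_neg (by simp)]
    have hc := contains_reach seq 0
    rw [hcond] at hc
    exact Option.not_isSome_iff_eq_none.mp (by simp [← hc])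

lemma step_eq (acc : List (List Int)) (seq : List Int) :
    (match pvFirstZero seq (generate_combinations seq.length) with
     | some c => acc ++ [c]
     | none => acc)
      = (if PySem.Set.contains (pvReach seq) 0 then
           acc ++ [pvGreedy 0 seq (pvReachList seq).tail] else acc) := by
  rw [solve_eq seq]
  cases h : PySem.Set.contains (pvReach seq) 0 <;> rfl

-- ===== VERDICT (by name: the statement is the Claim_ definition above) =====
theorem find_zero_sum_combinations_spec : Claim_equal_find_zero_sum_combinations := by
  intro sequences _
  unfold Spec_find_zero_sum_combinations find_zero_sum_combinations find_zero_sum_combinations_alt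
  congr 1
  funext acc seq
  exact step_eq acc seq
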